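-- pv_equiv track=rewrite | github.com/FlorianMargage/Jeu-de-la-vie | jeudelavie.py | diffgrid
-- ===== SOURCE A (Python) =====
-- def diffgrid(oldgrid, newgrid):
--     born = 0
--     dead = 0
--     for i in range(len(oldgrid)):
--         for j in range(len(oldgrid[0])):
--             if oldgrid[i][j] == 1 and newgrid[i][j] == 0:
--                 dead += 1
--             elif oldgrid[i][j] == 0 and (newgrid[i][j] == 1 or newgrid[i][j] == 2):
--                 born += 1
--     return [born, dead]
-- ===== SOURCE B (Python) =====
-- def diffgrid(oldgrid, newgrid):
--     trans = [(oldgrid[i][j], newgrid[i][j])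
--              for i in range(len(oldgrid))
--              for j in range(len(oldgrid[0]))]
--     return [trans.count((0, 1)) + trans.count((0, 2)), trans.count((1, 0))]
-- ===== Notes on version B (the rewrite author's own statement) =====
-- stated objective: alternative
-- what changed: Replaces the two branch-guarded accumulators in nested index loops by building one flat list of (old,new) transition pairs and reading the answer off with three .count() calls.
-- outside the precondition, e.g. on diffgrid([[5]], []): A returns [0, 0], B raises IndexError
import Mathlib
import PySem

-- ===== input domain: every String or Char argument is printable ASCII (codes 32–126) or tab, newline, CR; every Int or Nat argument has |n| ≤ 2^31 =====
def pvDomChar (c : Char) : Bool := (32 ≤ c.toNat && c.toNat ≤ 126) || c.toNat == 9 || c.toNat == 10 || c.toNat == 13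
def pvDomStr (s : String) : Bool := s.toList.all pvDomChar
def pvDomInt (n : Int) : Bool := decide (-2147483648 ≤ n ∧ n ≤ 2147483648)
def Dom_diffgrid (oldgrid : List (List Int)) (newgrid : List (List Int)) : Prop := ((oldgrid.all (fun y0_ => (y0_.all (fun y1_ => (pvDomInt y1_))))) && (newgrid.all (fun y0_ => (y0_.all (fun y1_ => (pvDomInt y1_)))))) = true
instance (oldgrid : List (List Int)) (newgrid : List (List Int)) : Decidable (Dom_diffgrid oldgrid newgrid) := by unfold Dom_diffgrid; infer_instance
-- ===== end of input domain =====

-- B builds one flat list of (old,new) transition pairs and reads the answer off with three counts,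
-- instead of A's branch-guarded pair of accumulators in nested index loops (objective: alternative).

-- ===== PORT A =====
def diffgrid (oldgrid : List (List Int)) (newgrid : List (List Int)) : List Int :=
  let res := (PySem.List.pyRange 0 oldgrid.length 1).foldl (fun bd i =>
    (PySem.List.pyRange 0 (PySem.List.pyGetD oldgrid 0 []).length 1).foldl (fun bd j =>
      let o := PySem.List.pyGetD (PySem.List.pyGetD oldgrid i []) j 0
      let n := PySem.List.pyGetD (PySem.List.pyGetD newgrid i []) j 0
      if o = 1 ∧ n = 0 then (bd.1, bd.2 + 1)
      else if o = 0 ∧ (n = 1 ∨ n = 2) then (bd.1 + 1, bd.2)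
      else bd) bd) (((0 : Int), (0 : Int)))
  [res.1, res.2]

-- ===== PORT B =====
def diffgrid_alt (oldgrid : List (List Int)) (newgrid : List (List Int)) : List Int :=
  let trans := (PySem.List.pyRange 0 oldgrid.length 1).flatMap (fun i =>
    (PySem.List.pyRange 0 (PySem.List.pyGetD oldgrid 0 []).length 1).map (fun j =>
      (PySem.List.pyGetD (PySem.List.pyGetD oldgrid i []) j 0,
       PySem.List.pyGetD (PySem.List.pyGetD newgrid i []) j 0)))
  [PySem.List.count trans ((0 : Int), (1 : Int)) + PySem.List.count trans ((0 : Int), (2 : Int)),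
   PySem.List.count trans ((1 : Int), (0 : Int))]

-- ===== PRECONDITION & SPEC =====
-- Pre_ excludes the inputs where indexing can raise: ragged oldgrid rows, or newgrid rows missing/too
-- short in the scanned rectangle. On some of the latter A still returns (its 'and' short-circuits when an
-- old cell is neither 0 nor 1, so newgrid is never touched there), but B builds every pair and raises.
def Pre_diffgrid (oldgrid : List (List Int)) (newgrid : List (List Int)) : Prop :=
  (oldgrid.headD []).length = 0 ∨
    (oldgrid.length ≤ newgrid.length ∧
     (∀ r ∈ oldgrid, (oldgrid.headD []).length ≤ r.length) ∧
     (∀ r ∈ newgrid.take oldgrid.length, (oldgrid.headD []).length ≤ r.length))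
instance (oldgrid : List (List Int)) (newgrid : List (List Int)) : Decidable (Pre_diffgrid oldgrid newgrid) := by unfold Pre_diffgrid; infer_instance
def pvWitness_diffgrid : List (List Int) × List (List Int) := ([[0, 1], [1, 1]], [[1, 0], [0, 2]])

def Spec_diffgrid (oldgrid : List (List Int)) (newgrid : List (List Int)) (out : List Int) : Prop := out = diffgrid_alt oldgrid newgrid
instance (oldgrid : List (List Int)) (newgrid : List (List Int)) (out : List Int) : Decidable (Spec_diffgrid oldgrid newgrid out) := by unfold Spec_diffgrid; infer_instance

-- ===== CLAIM (what is proved, stated in full; the proofs are below) =====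
def Claim_equal_diffgrid : Prop := ∀ (oldgrid : List (List Int)) (newgrid : List (List Int)), Dom_diffgrid oldgrid newgrid → Pre_diffgrid oldgrid newgrid → Spec_diffgrid oldgrid newgrid (diffgrid oldgrid newgrid)

-- ===== LEMMAS AND PROOFS =====

-- A's per-cell step, on the transition pair itself.
def pvStep (bd : Int × Int) (p : Int × Int) : Int × Int :=
  if p.1 = 1 ∧ p.2 = 0 then (bd.1, bd.2 + 1)
  else if p.1 = 0 ∧ (p.2 = 1 ∨ p.2 = 2) then (bd.1 + 1, bd.2)
  else bd

-- Folding A's step over any list of pairs yields exactly B's three counts.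
theorem pvStep_foldl_counts (l : List (Int × Int)) (b d : Int) :
    l.foldl pvStep (b, d) =
      (b + (l.count ((0 : Int), (1 : Int)) : Int) + (l.count ((0 : Int), (2 : Int)) : Int),
       d + (l.count ((1 : Int), (0 : Int)) : Int)) := by
  induction l generalizing b d with
  | nil => simp
  | cons p t ih =>
    simp only [List.foldl_cons, pvStep]
    rcases p with ⟨x, y⟩
    by_cases h1 : x = 1 ∧ y = 0
    · obtain ⟨rfl, rfl⟩ := h1
      simp [ih]
      ring
    · by_cases h2 : x = 0 ∧ (y = 1 ∨ y = 2)
      · simp only [if_neg h1, if_pos h2]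
        obtain ⟨rfl, h2⟩ := h2
        rcases h2 with rfl | rfl <;>
          · simp [ih]
            ring
      · simp only [if_neg h1, if_neg h2]
        rw [ih]
        have c1 : ¬ ((x, y) = ((0 : Int), (1 : Int))) := by rintro ⟨⟩; exact h2 ⟨rfl, Or.inl rfl⟩
        have c2 : ¬ ((x, y) = ((0 : Int), (2 : Int))) := by rintro ⟨⟩; exact h2 ⟨rfl, Or.inr rfl⟩
        have c3 : ¬ ((x, y) = ((1 : Int), (0 : Int))) := by rintro ⟨⟩; exact h1 ⟨rfl, rfl⟩
        simp [c1, c2, c3]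

-- ===== VERDICT (by name: the statement is the Claim_ definition above) =====
theorem diffgrid_spec : Claim_equal_diffgrid := by
  intro oldgrid newgrid _ _
  unfold Spec_diffgrid diffgrid diffgrid_alt
  simp only
  have hfold : ∀ (outer : List Int) (bd : Int × Int),
      outer.foldl (fun bd i =>
        (PySem.List.pyRange 0 (PySem.List.pyGetD oldgrid 0 []).length 1).foldl (fun bd j =>
          let o := PySem.List.pyGetD (PySem.List.pyGetD oldgrid i []) j 0
          let n := PySem.List.pyGetD (PySem.List.pyGetD newgrid i []) j 0
          if o = 1 ∧ n = 0 then (bd.1, bd.2 + 1)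
          else if o = 0 ∧ (n = 1 ∨ n = 2) then (bd.1 + 1, bd.2)
          else bd) bd) bd =
      (outer.flatMap (fun i =>
        (PySem.List.pyRange 0 (PySem.List.pyGetD oldgrid 0 []).length 1).map (fun j =>
          (PySem.List.pyGetD (PySem.List.pyGetD oldgrid i []) j 0,
           PySem.List.pyGetD (PySem.List.pyGetD newgrid i []) j 0)))).foldl pvStep bd := by
    intro outer
    induction outer with
    | nil => intro bd; rfl
    | cons i t ih =>
      intro bd
      simp only [List.foldl_cons, List.flatMap_cons, List.foldl_append, ih, List.foldl_map]
      rfl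
  rw [hfold, pvStep_foldl_counts]
  simp [PySem.List.count_eq]
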